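-- pv_equiv track=rewrite | github.com/seonjiwon/Python-Algorithm | algorithm/dynamic_programming/[Silver1] 오르막_수_11057.py | ascending_number
-- ===== SOURCE A (Python) =====
-- def ascending_number(n):
--   MOD = 10007
--   dp = [[0]*10 for _ in range(n+1)]
--
--   for i in range(10):
--     dp[1][i] = 1
--
--   for i in range(2, n+1):
--     for j in range(10):
--       dp[i][j] = sum(dp[i-1][j::]) % MOD
--   return sum(dp[n]) % MOD
-- ===== SOURCE B (Python) =====
-- def ascending_number(n):
--   # Stars and bars: ascending digit sequences of length n over 10 digits
--   # number C(n+9, 9); 10007 is prime but no reduction tricks are needed --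
--   # the product stays exact, so the final mod equals A's incrementally
--   # modded sum.
--   r = 1
--   for k in range(1, 10):
--     r = r * (n + k) // k
--   return r % 10007
-- ===== Notes on version B (the rewrite author's own statement) =====
-- stated objective: faster
-- what changed: Replaces the (n+1) x 10 DP table of suffix sums by the closed-form stars-and-bars count C(n+9,9), computed with a 9-step exact binomial product, then reduced mod 10007.
import Mathlib
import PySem

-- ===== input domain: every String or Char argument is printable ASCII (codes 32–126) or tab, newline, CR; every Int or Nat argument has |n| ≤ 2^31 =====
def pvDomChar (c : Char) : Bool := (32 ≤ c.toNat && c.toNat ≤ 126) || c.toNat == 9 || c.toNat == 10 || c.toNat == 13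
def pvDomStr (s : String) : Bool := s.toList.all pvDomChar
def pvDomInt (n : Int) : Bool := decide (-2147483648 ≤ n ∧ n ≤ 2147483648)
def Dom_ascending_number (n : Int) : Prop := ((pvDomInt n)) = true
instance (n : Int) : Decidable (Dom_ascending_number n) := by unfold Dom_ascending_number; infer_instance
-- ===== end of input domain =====

-- B replaces A's (n+1)x10 suffix-sum DP table by the closed-form stars-and-bars
-- count C(n+9,9) (an exact 9-step binomial product) reduced mod 10007; return
-- value only, no observable mutation.

-- ===== PORT A =====
-- dp[i][j] = sum(dp[i-1][j::]) % MOD; dp[i-1][j::] with j ≥ 0 is exactly List.drop j;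
-- '%' with the positive divisor 10007 is exact as Int.emod (agrees with Python's % for m > 0).
-- Rows are materialized one at a time: each dp row depends only on the previous one.
def nextRowA (prev : List Int) : List Int :=
  (List.range 10).map (fun j => (prev.drop j).sum % 10007)

-- rowA k is dp[1+k]: rowA 0 is the seeded dp[1] (ten ones), each step is the inner j-loop.
def rowA : Nat → List Int
  | 0 => List.replicate 10 1
  | k + 1 => nextRowA (rowA k)

def ascending_number (n : Int) : Int :=
  (rowA (n.toNat - 1)).sum % 10007

-- ===== PORT B =====
-- Source B: r = 1; for k in range(1, 10): r = r * (n + k) // k; return r % 10007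
def ascending_number_alt (n : Int) : Int :=
  ((PySem.List.pyRange 1 10 1).foldl
    (fun r k => PySem.Int.floordiv (r * (n + k)) k) 1) % 10007

-- ===== PRECONDITION & SPEC =====
-- A raises IndexError (dp[1] on a table with fewer than 2 rows) for n < 1; exactly those inputs are excluded.
def Pre_ascending_number (n : Int) : Prop := 1 ≤ n
instance (n : Int) : Decidable (Pre_ascending_number n) := by unfold Pre_ascending_number; infer_instance
def pvWitness_ascending_number : Int := (3)
def Spec_ascending_number (n : Int) (out : Int) : Prop := out = ascending_number_alt n
instance (n : Int) (out : Int) : Decidable (Spec_ascending_number n out) := by unfold Spec_ascending_number; infer_instance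

-- ===== CLAIM (what is proved, stated in full; the proofs are below) =====
def Claim_equal_ascending_number : Prop := ∀ (n : Int), Dom_ascending_number n → Pre_ascending_number n → Spec_ascending_number n (ascending_number n)
-- ===== LEMMAS AND PROOFS =====

-- the exact (un-modded) dp row of index 1+k: entry j counts ascending sequences of
-- length 1+k starting at digit j, which is C(k + (9-j), k)
def rowE (k : Nat) : List Int := (List.range 10).map (fun j => (((k + (9 - j)).choose k : Nat) : Int))

-- a sum of mod-10007 residues, reduced mod 10007, equals the exact sum mod 10007
lemma modsum (xs : List Int) : (xs.map (· % 10007)).sum % 10007 = xs.sum % 10007 := by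
  induction xs with
  | nil => rfl
  | cons x xs ih =>
    simp only [List.map_cons, List.sum_cons]
    rw [Int.add_emod, Int.emod_emod_of_dvd _ (dvd_refl _), ih, ← Int.add_emod]

-- hockey stick on the suffixes of rowE: the last m entries sum to C(k+m, k+1)
lemma rowE_drop_sum (k : Nat) : ∀ m : Nat, m ≤ 10 → ((rowE k).drop (10 - m)).sum = (((k + m).choose (k + 1) : Nat) : Int) := by
  intro m
  induction m with
  | zero =>
    intro _
    have h10 : (rowE k).length = 10 := by simp [rowE]
    rw [Nat.sub_zero, ← h10, List.drop_length]
    simp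
  | succ m ih =>
    intro hm
    have hj : 10 - (m + 1) < (rowE k).length := by simp [rowE]; omega
    rw [List.drop_eq_getElem_cons hj, List.sum_cons]
    have hstep : 10 - (m + 1) + 1 = 10 - m := by omega
    rw [hstep, ih (by omega)]
    have hget : (rowE k)[10 - (m + 1)]'hj = (((k + m).choose k : Nat) : Int) := by
      simp only [rowE, List.getElem_map, List.getElem_range]
      congr 2
      omega
    rw [hget]
    rw [show k + (m + 1) = (k + m) + 1 by omega, Nat.choose_succ_succ (k + m) k]
    push_cast
    ring

-- A's row is exactly rowE reduced entrywise mod 10007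
lemma rowA_eq_rowE_mod (k : Nat) : rowA k = (rowE k).map (· % 10007) := by
  induction k with
  | zero => rfl
  | succ k ih =>
    show nextRowA (rowA k) = (rowE (k + 1)).map (· % 10007)
    apply List.ext_getElem
    · simp [nextRowA, rowE]
    intro j hj1 hj2
    have hj10 : j < 10 := by
      simpa [nextRowA] using hj1
    simp only [nextRowA, rowE, List.getElem_map, List.getElem_range]
    rw [ih]
    rw [← List.map_drop, modsum]
    have hd : ((rowE k).drop j).sum = (((k + (10 - j)).choose (k + 1) : Nat) : Int) := by
      have := rowE_drop_sum k (10 - j) (by omega)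
      rwa [show 10 - (10 - j) = j by omega] at this
    rw [hd, show k + (10 - j) = k + 1 + (9 - j) by omega]

-- B's product loop: after the first k factors, r = C(t+k, k) exactly
lemma bfold (t : Nat) : ∀ k : Nat, (PySem.List.pyRange 1 ((k : Int) + 1) 1).foldl
    (fun r j => PySem.Int.floordiv (r * ((t : Int) + j)) j) 1 = (((t + k).choose k : Nat) : Int) := by
  intro k
  induction k with
  | zero =>
    rw [show (((0 : Nat) : Int) + 1) = 1 by norm_num, PySem.List.pyRange_one_eq_nil (le_refl 1)]
    simp
  | succ k ih =>
    rw [show (((k + 1 : Nat) : Int) + 1) = ((k : Int) + 1) + 1 by push_cast; ring,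
        PySem.List.pyRange_one_succ_right (by omega : (1:Int) ≤ (k : Int) + 1),
        List.foldl_append]
    simp only [List.foldl_cons, List.foldl_nil]
    rw [ih]
    have hnat : (t + k + 1) * (t + k).choose k = (t + k + 1).choose (k + 1) * (k + 1) :=
      Nat.add_one_mul_choose_eq (t + k) k
    have hcast : (((t + k).choose k : Nat) : Int) * ((t : Int) + ((k : Int) + 1))
        = (((t + k + 1).choose (k + 1) : Nat) : Int) * ((k : Int) + 1) := by
      push_cast at hnat
      nlinarith [hnat]
    rw [hcast, PySem.Int.floordiv_eq_ediv_of_pos (by omega : (0:Int) < (k : Int) + 1),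
        Int.mul_ediv_cancel _ (by omega : ((k : Int) + 1) ≠ 0),
        show t + (k + 1) = t + k + 1 by omega]

-- ===== VERDICT (by name: the statement is the Claim_ definition above) =====
theorem ascending_number_spec : Claim_equal_ascending_number := by
  intro n _ hn
  replace hn : 1 ≤ n := hn
  unfold Spec_ascending_number ascending_number ascending_number_alt
  have hu : 1 ≤ n.toNat := by omega
  have hnu : n = ((n.toNat : Nat) : Int) := by omega
  rw [hnu]
  simp only [Int.toNat_natCast]
  -- A's side: sum of dp[n] mod 10007 = C((u-1)+10, (u-1)+1) mod 10007
  rw [rowA_eq_rowE_mod, modsum]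
  have hA : (rowE (n.toNat - 1)).sum = (((n.toNat - 1 + 10).choose (n.toNat - 1 + 1) : Nat) : Int) := by
    have := rowE_drop_sum (n.toNat - 1) 10 (le_refl 10)
    simpa using this
  rw [hA]
  -- B's side: the product loop computes C(u+9, 9)
  have hB := bfold n.toNat 9
  rw [show (((9 : Nat) : Int) + 1) = 10 by norm_num] at hB
  rw [hB]
  -- C(u+9, u) = C(u+9, 9) by symmetry (u = n.toNat ≥ 1)
  congr 2
  rw [show n.toNat - 1 + 10 = n.toNat + 9 by omega, show n.toNat - 1 + 1 = n.toNat by omega]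
  rw [show n.toNat = (n.toNat + 9) - 9 by omega]
  exact Nat.choose_symm (by omega)
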